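-- pv_equiv track=rewrite | github.com/visaobusinesstech/VBSolution | apply_complete_migration.py | split_sql_part
-- ===== SOURCE A (Python) =====
-- def split_sql_part(sql_part):
--     """Divide uma parte SQL em subpartes menores"""
--     # Dividir por comandos principais
--     parts = []
--     current_part = ""
--
--     for line in sql_part.split('\n'):
--         if line.strip().startswith('--') or line.strip().startswith('CREATE') or line.strip().startswith('DROP'):
--             if current_part.strip():
--                 parts.append(current_part.strip())
--                 current_part = ""
--         current_part += line + "\n"
--
--     if current_part.strip():
--         parts.append(current_part.strip())
--
--     return parts
-- ===== SOURCE B (Python) =====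
-- def split_sql_part(sql_part):
--     """Divide uma parte SQL em subpartes menores"""
--     def is_boundary(line):
--         s = line.strip()
--         return s.startswith('--') or s.startswith('CREATE') or s.startswith('DROP')
--
--     lines = sql_part.split('\n')
--     cuts = [i for i, line in enumerate(lines) if is_boundary(line)]
--     bounds = [0] + cuts + [len(lines)]
--     segs = ['\n'.join(lines[a:b]).strip() for a, b in zip(bounds, bounds[1:])]
--     return [s for s in segs if s]
-- ===== Notes on version B (the rewrite author's own statement) =====
-- stated objective: alternative
-- what changed: Replaces the running string buffer with flush-on-boundary by a cut-point index table over the split lines followed by a segment slicing/joining pass (no mutable buffer, no flush logic).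
import Mathlib
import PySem

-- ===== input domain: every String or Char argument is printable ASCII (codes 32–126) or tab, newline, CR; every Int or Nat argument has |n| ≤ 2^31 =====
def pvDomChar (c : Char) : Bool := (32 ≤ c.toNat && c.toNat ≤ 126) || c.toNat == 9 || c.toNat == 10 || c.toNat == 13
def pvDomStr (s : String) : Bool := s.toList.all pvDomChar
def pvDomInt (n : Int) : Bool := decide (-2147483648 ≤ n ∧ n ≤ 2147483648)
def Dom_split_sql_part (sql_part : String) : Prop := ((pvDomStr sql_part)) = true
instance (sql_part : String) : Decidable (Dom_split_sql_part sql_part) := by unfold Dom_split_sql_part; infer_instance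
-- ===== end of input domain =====

-- B replaces A's running buffer with flush-on-boundary by a cut-point index table plus a
-- segment slicing/joining pass (objective: alternative decomposition, same O(n) cost).

-- ===== PORT A =====
def split_sql_part (sql_part : String) : List String :=
  let lines := (PySem.Str.split? sql_part "\n").getD []
  let fin := lines.foldl (fun (st : List String × String) line =>
      let st :=
        if PySem.Str.startswith (PySem.Str.strip line) "--"
            || PySem.Str.startswith (PySem.Str.strip line) "CREATE"
            || PySem.Str.startswith (PySem.Str.strip line) "DROP" then
          if PySem.Str.strip st.2 ≠ "" then (st.1 ++ [PySem.Str.strip st.2], "") else st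
        else st
      (st.1, st.2 ++ line ++ "\n")) ([], "")
  if PySem.Str.strip fin.2 ≠ "" then fin.1 ++ [PySem.Str.strip fin.2] else fin.1

-- ===== PORT B =====
def isBoundary (line : String) : Bool :=
  PySem.Str.startswith (PySem.Str.strip line) "--"
  || PySem.Str.startswith (PySem.Str.strip line) "CREATE"
  || PySem.Str.startswith (PySem.Str.strip line) "DROP"

def split_sql_part_alt (sql_part : String) : List String :=
  let lines := (PySem.Str.split? sql_part "\n").getD []
  let cuts : List Int := ((PySem.List.enumerate lines).filter (fun p => isBoundary p.2)).map (fun p => p.1)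
  let bounds : List Int := 0 :: cuts ++ [(lines.length : Int)]
  let segs := (bounds.zip bounds.tail).map (fun p =>
      PySem.Str.strip (PySem.Str.join "\n" (PySem.List.slice lines (some p.1) (some p.2))))
  segs.filter (fun s => s ≠ "")

-- ===== PRECONDITION & SPEC =====
def Spec_split_sql_part (sql_part : String) (out : List String) : Prop := out = split_sql_part_alt sql_part
instance (sql_part : String) (out : List String) : Decidable (Spec_split_sql_part sql_part out) := by unfold Spec_split_sql_part; infer_instance

-- ===== CLAIM (what is proved, stated in full; the proofs are below) =====
def Claim_equal_split_sql_part : Prop := ∀ (sql_part : String), Dom_split_sql_part sql_part → Spec_split_sql_part sql_part (split_sql_part sql_part)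

-- ===== LEMMAS AND PROOFS =====

theorem strExt {s t : String} (h : s.toList = t.toList) : s = t := by
  have := congrArg String.ofList h; simpa using this

theorem chars_rstrip_append_nl (cs : List Char) :
    PySem.Chars.rstrip (cs ++ ['\n']) = PySem.Chars.rstrip cs := by
  simp [PySem.Chars.rstrip, show PySem.Chars.isspace '\n' = true from rfl]

theorem chars_strip_append_nl (cs : List Char) :
    PySem.Chars.strip (cs ++ ['\n']) = PySem.Chars.strip cs := by
  simp only [PySem.Chars.strip, PySem.Chars.lstrip, List.dropWhile_append]
  split_ifs with h
  · simp only [List.isEmpty_iff] at h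
    simp [h, show PySem.Chars.isspace '\n' = true from rfl, PySem.Chars.rstrip]
  · exact chars_rstrip_append_nl _

theorem strip_append_nl (s : String) : PySem.Str.strip (s ++ "\n") = PySem.Str.strip s := by
  apply strExt
  simp [PySem.Str.strip]
  simpa using chars_strip_append_nl s.toList

theorem strip_eq_empty_iff (s : String) : PySem.Str.strip s = "" ↔ PySem.Chars.strip s.toList = [] := by
  constructor
  · intro h; have := congrArg String.toList h; simpa [PySem.Str.strip] using this
  · intro h; apply strExt; simp [PySem.Str.strip, h]

theorem chars_strip_eq_nil_all (cs : List Char) (h : PySem.Chars.strip cs = []) :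
    ∀ x ∈ cs, PySem.Chars.isspace x = true := by
  simp only [PySem.Chars.strip, PySem.Chars.rstrip, PySem.Chars.lstrip] at h
  have h2 : ∀ x ∈ List.dropWhile PySem.Chars.isspace cs, PySem.Chars.isspace x = true := by
    have := congrArg List.reverse h
    simp only [List.reverse_reverse, List.reverse_nil] at this
    rw [List.dropWhile_eq_nil_iff] at this
    intro x hx; exact this x (by simpa using hx)
  intro x hx
  rw [← List.takeWhile_append_dropWhile (p := PySem.Chars.isspace) (l := cs)] at hx
  rcases List.mem_append.1 hx with h3 | h3
  · exact List.mem_takeWhile_imp h3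
  · exact h2 x h3

theorem strip_empty_append (s t : String) (h : PySem.Str.strip s = "") :
    PySem.Str.strip (s ++ t) = PySem.Str.strip t := by
  have hall := chars_strip_eq_nil_all s.toList ((strip_eq_empty_iff s).1 h)
  apply strExt
  simp only [PySem.Str.strip, String.toList_ofList, String.toList_append]
  simp only [PySem.Chars.strip, PySem.Chars.lstrip, List.dropWhile_append]
  rw [List.dropWhile_eq_nil_iff.2 hall]
  simp

def joinNL : List String → String
  | [] => ""
  | l :: c => l ++ "\n" ++ joinNL c

def mstrip (c : List String) : String := PySem.Str.strip (PySem.Str.join "\n" c)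

theorem joinNL_eq (c : List String) (h : c ≠ []) : joinNL c = PySem.Str.join "\n" c ++ "\n" := by
  induction c with
  | nil => exact absurd rfl h
  | cons l c ih =>
    cases c with
    | nil =>
      apply strExt
      simp [joinNL, PySem.Str.join, PySem.Chars.join_singleton]
    | cons m c =>
      apply strExt
      have := congrArg String.toList (ih (by simp))
      rw [show joinNL (l :: m :: c) = l ++ "\n" ++ joinNL (m :: c) from rfl]
      simp only [String.toList_append]
      rw [this]
      simp [PySem.Str.join, PySem.Chars.join_cons_cons]

theorem strip_joinNL (c : List String) : PySem.Str.strip (joinNL c) = mstrip c := by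
  cases c with
  | nil =>
    apply strExt
    simp [joinNL, mstrip, PySem.Str.strip, PySem.Str.join, PySem.Chars.join, List.intercalate]
  | cons l c =>
    rw [joinNL_eq _ (by simp), strip_append_nl]; rfl

def cutsN : List String → List Nat
  | [] => []
  | l :: ls => if isBoundary l then 0 :: (cutsN ls).map (· + 1) else (cutsN ls).map (· + 1)

def segsN (ls : List String) : List (List String) :=
  ((0 :: (cutsN ls ++ [ls.length])).zip (cutsN ls ++ [ls.length])).map
    (fun p => (ls.drop p.1).take (p.2 - p.1))

theorem zip_tail_map_succ (t : List Nat) :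
    (t.map (· + 1)).zip ((t.map (· + 1)).tail) =
      (t.zip t.tail).map (Prod.map (· + 1) (· + 1)) := by
  rw [← List.map_tail, List.zip_map]

theorem segsN_ne_nil (ls : List String) : segsN ls ≠ [] := by
  cases h : cutsN ls <;> simp [segsN, h]

theorem segsN_key (l : String) (ls : List String) (t0 : Nat) (t1 : List Nat)
    (ht : cutsN ls ++ [ls.length] = t0 :: t1) :
    ((0 :: (cutsN ls ++ [ls.length]).map (· + 1)).zip
        ((cutsN ls ++ [ls.length]).map (· + 1))).map
          (fun p => ((l :: ls).drop p.1).take (p.2 - p.1)) =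
      (l :: ((ls.drop 0).take t0)) ::
        ((t0 :: t1).zip t1).map (fun p => (ls.drop p.1).take (p.2 - p.1)) := by
  rw [ht]
  simp only [List.map_cons, List.zip_cons_cons, List.map_cons, List.cons.injEq]
  refine ⟨by simp [List.take_succ_cons], ?_⟩
  rw [show (((t0 + 1) :: t1.map (· + 1)) = (t0 :: t1).map (· + 1)) from by simp,
      show (t1.map (· + 1)) = ((t0 :: t1).map (· + 1)).tail from by simp]
  rw [zip_tail_map_succ]
  simp [List.map_map, Function.comp, Nat.succ_sub_succ, Prod.map]

theorem segsN_headI_tail (ls : List String) (t0 : Nat) (t1 : List Nat)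
    (ht : cutsN ls ++ [ls.length] = t0 :: t1) :
    (segsN ls).headI = (ls.drop 0).take t0 ∧
    (segsN ls).tail = ((t0 :: t1).zip t1).map (fun p => (ls.drop p.1).take (p.2 - p.1)) := by
  rw [segsN, ht]
  simp [List.zip_cons_cons]

theorem segsN_cons (l : String) (ls : List String) :
    segsN (l :: ls) =
      if isBoundary l then [] :: (l :: (segsN ls).headI) :: (segsN ls).tail
      else (l :: (segsN ls).headI) :: (segsN ls).tail := by
  obtain ⟨t0, t1, ht⟩ : ∃ t0 t1, cutsN ls ++ [ls.length] = t0 :: t1 := by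
    cases h : cutsN ls with
    | nil => exact ⟨_, _, rfl⟩
    | cons a t => exact ⟨_, _, rfl⟩
  obtain ⟨h1, h2⟩ := segsN_headI_tail ls t0 t1 ht
  have hmap : (cutsN ls).map (· + 1) ++ [ls.length + 1] =
      (cutsN ls ++ [ls.length]).map (· + 1) := by simp
  rw [h1, h2]
  by_cases hb : isBoundary l
  · simp only [segsN, cutsN, hb, if_true, List.length_cons, List.cons_append, hmap,
      List.zip_cons_cons, List.map_cons, List.drop_zero, List.take_zero, Nat.sub_zero,
      List.cons.injEq]
    exact ⟨trivial, segsN_key l ls t0 t1 ht⟩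
  · rw [Bool.not_eq_true] at hb
    simp only [segsN, cutsN, hb, Bool.false_eq_true, if_false, List.length_cons, hmap]
    exact segsN_key l ls t0 t1 ht

def fA (cur : String) : List String → List String
  | [] => if PySem.Str.strip cur ≠ "" then [PySem.Str.strip cur] else []
  | l :: ls =>
      if isBoundary l then
        (if PySem.Str.strip cur ≠ "" then PySem.Str.strip cur :: fA ("" ++ l ++ "\n") ls
         else fA (cur ++ l ++ "\n") ls)
      else fA (cur ++ l ++ "\n") ls

theorem A_fold (ls : List String) : ∀ (parts : List String) (cur : String),
    (if PySem.Str.strip (ls.foldl (fun (st : List String × String) line =>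
      let st :=
        if PySem.Str.startswith (PySem.Str.strip line) "--"
            || PySem.Str.startswith (PySem.Str.strip line) "CREATE"
            || PySem.Str.startswith (PySem.Str.strip line) "DROP" then
          if PySem.Str.strip st.2 ≠ "" then (st.1 ++ [PySem.Str.strip st.2], "") else st
        else st
      (st.1, st.2 ++ line ++ "\n")) (parts, cur)).2 ≠ ""
     then (ls.foldl (fun (st : List String × String) line =>
      let st :=
        if PySem.Str.startswith (PySem.Str.strip line) "--"
            || PySem.Str.startswith (PySem.Str.strip line) "CREATE"
            || PySem.Str.startswith (PySem.Str.strip line) "DROP" then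
          if PySem.Str.strip st.2 ≠ "" then (st.1 ++ [PySem.Str.strip st.2], "") else st
        else st
      (st.1, st.2 ++ line ++ "\n")) (parts, cur)).1 ++ [PySem.Str.strip (ls.foldl (fun (st : List String × String) line =>
      let st :=
        if PySem.Str.startswith (PySem.Str.strip line) "--"
            || PySem.Str.startswith (PySem.Str.strip line) "CREATE"
            || PySem.Str.startswith (PySem.Str.strip line) "DROP" then
          if PySem.Str.strip st.2 ≠ "" then (st.1 ++ [PySem.Str.strip st.2], "") else st
        else st
      (st.1, st.2 ++ line ++ "\n")) (parts, cur)).2]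
     else (ls.foldl (fun (st : List String × String) line =>
      let st :=
        if PySem.Str.startswith (PySem.Str.strip line) "--"
            || PySem.Str.startswith (PySem.Str.strip line) "CREATE"
            || PySem.Str.startswith (PySem.Str.strip line) "DROP" then
          if PySem.Str.strip st.2 ≠ "" then (st.1 ++ [PySem.Str.strip st.2], "") else st
        else st
      (st.1, st.2 ++ line ++ "\n")) (parts, cur)).1)
    = parts ++ fA cur ls := by
  induction ls with
  | nil =>
    intro parts cur
    simp only [List.foldl_nil, fA]
    by_cases hc : PySem.Str.strip cur = "" <;> simp [hc]
  | cons l ls ih =>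
    intro parts cur
    simp only [List.foldl_cons]
    by_cases hb : isBoundary l
    · have hb' : (PySem.Str.startswith (PySem.Str.strip l) "--"
            || PySem.Str.startswith (PySem.Str.strip l) "CREATE"
            || PySem.Str.startswith (PySem.Str.strip l) "DROP") = true := hb
      by_cases hc : PySem.Str.strip cur = ""
      · simp only [hb', if_true, hc, fA, hb]
        simpa [hc] using ih parts (cur ++ l ++ "\n")
      · simp only [hb', if_true, hc, fA, hb]
        have := ih (parts ++ [PySem.Str.strip cur]) ("" ++ l ++ "\n")
        simpa [hc, List.append_assoc] using this
    · have hb' : (PySem.Str.startswith (PySem.Str.strip l) "--"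
            || PySem.Str.startswith (PySem.Str.strip l) "CREATE"
            || PySem.Str.startswith (PySem.Str.strip l) "DROP") = false := by
        rw [Bool.not_eq_true] at hb; exact hb
      simp only [hb', Bool.false_eq_true, if_false, fA, hb]
      exact ih parts (cur ++ l ++ "\n")

theorem segsN_nil : segsN [] = [[]] := rfl

theorem G (ls : List String) : ∀ cur : String,
    fA cur ls =
      (PySem.Str.strip (cur ++ joinNL ((segsN ls).headI)) :: ((segsN ls).tail).map mstrip).filter
        (fun s => s ≠ "") := by
  induction ls with
  | nil =>
    intro cur
    simp only [segsN_nil, List.headI, List.tail_cons, joinNL, List.map_nil, fA]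
    by_cases hc : PySem.Str.strip cur = "" <;>
      simp [List.filter_cons, hc]
  | cons l ls ih =>
    intro cur
    have hassoc : ∀ x : String, (x ++ l ++ "\n") ++ joinNL ((segsN ls).headI) =
        x ++ joinNL (l :: (segsN ls).headI) := by
      intro x
      show _ = x ++ (l ++ "\n" ++ joinNL ((segsN ls).headI))
      rw [← String.append_assoc, ← String.append_assoc]
    rw [segsN_cons]
    by_cases hb : isBoundary l
    · by_cases hc : PySem.Str.strip cur = ""
      · simp only [fA, hb, if_true, hc, if_false]
        rw [ih (cur ++ l ++ "\n"), hassoc cur,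
            strip_empty_append cur _ hc, strip_joinNL]
        simp only [List.headI, List.tail_cons, List.map_cons, joinNL]
        rw [show cur ++ "" = cur from by simp]
        simp [List.filter_cons, hc]
      · simp only [fA, hb, if_true, hc]
        rw [ih ("" ++ l ++ "\n"), hassoc "",
            strip_empty_append "" _ rfl, strip_joinNL]
        simp only [List.headI, List.tail_cons, List.map_cons, joinNL]
        rw [show cur ++ "" = cur from by simp]
        simp [List.filter_cons, hc]
    · simp only [fA, hb, if_false]
      rw [ih (cur ++ l ++ "\n"), hassoc cur]
      simp [List.headI, List.tail_cons]

theorem cuts_eq (ls : List String) : ∀ s : Int,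
    ((PySem.List.enumerate ls s).filter (fun p => isBoundary p.2)).map (fun p => p.1) =
      (cutsN ls).map (fun k : Nat => s + (k : Int)) := by
  induction ls with
  | nil => intro s; simp [PySem.List.enumerate_nil, cutsN]
  | cons l ls ih =>
    intro s
    rw [PySem.List.enumerate_cons]
    have hmapmap : ∀ f : Nat → Nat, ((cutsN ls).map f).map (fun k : Nat => s + (k : Int)) =
        (cutsN ls).map (fun k : Nat => s + (f k : Int)) := fun f => by
      rw [List.map_map]; rfl
    by_cases hb : isBoundary l
    · rw [show List.filter (fun p => isBoundary p.2) ((s, l) :: PySem.List.enumerate ls (s + 1)) =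
            (s, l) :: List.filter (fun p => isBoundary p.2) (PySem.List.enumerate ls (s + 1)) from by
          simp [List.filter_cons, hb]]
      rw [List.map_cons, ih (s + 1), show cutsN (l :: ls) = 0 :: (cutsN ls).map (· + 1) from by
        simp [cutsN, hb]]
      rw [List.map_cons, hmapmap]
      refine List.cons_eq_cons.mpr ⟨by push_cast; ring, ?_⟩
      apply List.map_congr_left
      intro k _
      push_cast
      ring
    · rw [Bool.not_eq_true] at hb
      rw [show List.filter (fun p => isBoundary p.2) ((s, l) :: PySem.List.enumerate ls (s + 1)) =
            List.filter (fun p => isBoundary p.2) (PySem.List.enumerate ls (s + 1)) from by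
          simp [List.filter_cons, hb]]
      rw [ih (s + 1), show cutsN (l :: ls) = (cutsN ls).map (· + 1) from by
        simp [cutsN, hb]]
      rw [hmapmap]
      apply List.map_congr_left
      intro k _
      push_cast
      ring

theorem B_eq_segsN (ls : List String) :
    ((((0 : Int) :: ((PySem.List.enumerate ls).filter (fun p => isBoundary p.2)).map (fun p => p.1) ++ [(ls.length : Int)]).zip
      (((0 : Int) :: ((PySem.List.enumerate ls).filter (fun p => isBoundary p.2)).map (fun p => p.1) ++ [(ls.length : Int)]).tail)).map (fun p =>
        PySem.Str.strip (PySem.Str.join "\n" (PySem.List.slice ls (some p.1) (some p.2)))))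
    = (segsN ls).map mstrip := by
  have hc : ((PySem.List.enumerate ls).filter (fun p => isBoundary p.2)).map (fun p => p.1) =
      (cutsN ls).map (fun k : Nat => (k : Int)) := by
    rw [cuts_eq ls 0]
    apply List.map_congr_left
    intro k _
    ring
  rw [hc]
  have hb : ((0 : Int) :: (cutsN ls).map (fun k : Nat => (k : Int)) ++ [(ls.length : Int)]) =
      ((0 :: (cutsN ls ++ [ls.length])).map (fun k : Nat => (k : Int))) := by
    simp only [List.map_cons, List.map_append, List.map_nil, Nat.cast_zero, List.cons_append,
      List.nil_append]
  rw [hb, ← List.map_tail, List.zip_map, List.map_map, segsN, List.map_map]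
  apply List.map_congr_left
  intro p _
  simp only [Function.comp, Prod.map]
  rw [PySem.List.slice_natCast]
  rfl

-- ===== VERDICT (by name: the statement is the Claim_ definition above) =====
theorem split_sql_part_spec : Claim_equal_split_sql_part := by
  intro s _
  unfold Spec_split_sql_part
  have hA : split_sql_part s = [] ++ fA "" ((PySem.Str.split? s "\n").getD []) :=
    A_fold ((PySem.Str.split? s "\n").getD []) [] ""
  have hB : split_sql_part_alt s =
      ((segsN ((PySem.Str.split? s "\n").getD [])).map mstrip).filter (fun x => x ≠ "") :=
    congrArg (List.filter _) (B_eq_segsN ((PySem.Str.split? s "\n").getD []))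
  rw [hA, hB, List.nil_append, G _ ""]
  obtain ⟨c0, tl, hseg⟩ : ∃ c0 tl, segsN ((PySem.Str.split? s "\n").getD []) = c0 :: tl := by
    cases h : segsN ((PySem.Str.split? s "\n").getD []) with
    | nil => exact absurd h (segsN_ne_nil _)
    | cons a t => exact ⟨_, _, rfl⟩
  rw [hseg]
  simp only [List.headI, List.tail_cons, List.map_cons]
  rw [show ("" ++ joinNL c0) = joinNL c0 from by simp, strip_joinNL]
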